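-- pv_equiv track=rewrite | github.com/Skyffox/Advent-of-Code | 2015/day07.py | get_value
-- ===== SOURCE A (Python) =====
-- from typing import Dict
--
-- def get_value(wire: str, instructions: Dict[str, str], cache: Dict[str, int]) -> int:
--     """
--     Recursively evaluates the 16-bit signal provided to a wire, using memoization.
--
--     Args:
--         wire (str): The wire to evaluate.
--         instructions (Dict[str, str]): Mapping of wires to logic expressions.
--         cache (Dict[str, int]): A memoization cache to store evaluated wire values.
--
--     Returns:
--         int: The computed signal value for the given wire.
--     """
--     if wire.isdigit():
--         return int(wire)
--
--     if wire in cache: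
--         return cache[wire]
--
--     expr = instructions[wire]
--     tokens = expr.split()
--
--     if len(tokens) == 1:
--         val = get_value(tokens[0], instructions, cache)
--     elif len(tokens) == 2:  # NOT x
--         val = ~get_value(tokens[1], instructions, cache) & 0xFFFF
--     elif len(tokens) == 3:
--         a, op, b = tokens
--         if op == "AND":
--             val = get_value(a, instructions, cache) & get_value(b, instructions, cache)
--         elif op == "OR":
--             val = get_value(a, instructions, cache) | get_value(b, instructions, cache)
--         elif op == "LSHIFT":
--             val = get_value(a, instructions, cache) << int(b)
--         elif op == "RSHIFT":
--             val = get_value(a, instructions, cache) >> int(b)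
--         else:
--             raise ValueError(f"Unknown operation: {op}")
--     else:
--         raise ValueError(f"Unrecognized expression: {expr}")
--
--     cache[wire] = val & 0xFFFF
--     return cache[wire]
-- ===== SOURCE B (Python) =====
-- def get_value(wire, instructions, cache):
--     """Bottom-up rounds evaluator: repeatedly sweep the instruction table,
--     computing every wire whose operands are already available, until the
--     requested wire is resolved (same values as the recursive version; reads
--     `cache` but does not write into it)."""
--     if wire.isdigit():
--         return int(wire)
--
--     table = dict(cache)
--
--     def resolved(t):
--         return t.isdigit() or t in table
--
--     def val(t):
--         return int(t) if t.isdigit() else table[t]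
--
--     def try_compute(expr):
--         tokens = expr.split()
--         if len(tokens) == 1:
--             t = tokens[0]
--             return val(t) if resolved(t) else None
--         if len(tokens) == 2:  # NOT x
--             t = tokens[1]
--             return (~val(t) & 0xFFFF) if resolved(t) else None
--         if len(tokens) == 3:
--             a, op, b = tokens
--             if op in ("AND", "OR"):
--                 if resolved(a) and resolved(b):
--                     return (val(a) & val(b)) if op == "AND" else (val(a) | val(b))
--                 return None
--             if op in ("LSHIFT", "RSHIFT"):
--                 if not resolved(a):
--                     return None
--                 try:
--                     k = int(b)
--                 except ValueError:
--                     return None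
--                 if k < 0:
--                     return None
--                 return (val(a) << k) if op == "LSHIFT" else (val(a) >> k)
--         return None
--
--     for _ in range(len(instructions)):
--         if wire in table:
--             break
--         progress = False
--         for w, expr in instructions.items():
--             if resolved(w):
--                 continue
--             v = try_compute(expr)
--             if v is not None:
--                 table[w] = v & 0xFFFF
--                 progress = True
--         if not progress:
--             break
--
--     return table[wire]
-- ===== Notes on version B (the rewrite author's own statement) =====
-- stated objective: alternative
-- what changed: Replaces A's top-down memoized recursion over the wire DAG with a bottom-up rounds evaluator: repeated sweeps over the instruction table compute every wire whose operands are already available (digit literal or tabled), until the requested wire is resolved or a sweep makes no progress; same values, masking and operator semantics, but B reads the cache without writing A's memoization into it.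
import Mathlib
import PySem

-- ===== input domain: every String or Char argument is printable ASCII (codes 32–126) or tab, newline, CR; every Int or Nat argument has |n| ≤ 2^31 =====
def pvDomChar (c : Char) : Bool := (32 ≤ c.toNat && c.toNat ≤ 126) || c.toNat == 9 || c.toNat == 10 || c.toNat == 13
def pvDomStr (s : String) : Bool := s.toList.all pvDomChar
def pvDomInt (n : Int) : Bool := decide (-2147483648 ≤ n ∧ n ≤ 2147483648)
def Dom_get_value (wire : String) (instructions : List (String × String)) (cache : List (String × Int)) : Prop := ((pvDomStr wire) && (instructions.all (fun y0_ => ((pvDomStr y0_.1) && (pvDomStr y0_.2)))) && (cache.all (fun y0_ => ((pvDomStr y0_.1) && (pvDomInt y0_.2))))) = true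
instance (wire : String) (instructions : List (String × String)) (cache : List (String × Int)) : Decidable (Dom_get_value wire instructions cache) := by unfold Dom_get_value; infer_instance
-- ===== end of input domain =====

-- B replaces A's top-down memoized recursion over the wire DAG by a bottom-up rounds evaluator
-- (repeated sweeps over the instruction table computing every wire whose operands are available) —
-- an alternative decomposition with the same values; the equivalence is about the RETURN value
-- (A memoizes into `cache`, a side effect B does not perform: B reads `cache` but never writes it).

-- ===== PORT A =====
-- A's `cache[wire] = val & 0xFFFF; return cache[wire]` tail, shared by every branch.
def gvAfinish (wire : String) (val : Int) (c : PySem.Dict String Int) : Option (Int × PySem.Dict String Int) :=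
  let m := PySem.Int.band val 65535
  some (m, c.insert wire m)

-- Literal port of A's recursion, threading the mutated cache; `none` is exactly where the Python
-- raises (KeyError / ValueError / negative shift count), and the fuel bounds the recursion depth
-- (an acyclic program needs at most one level per distinct instruction key; on cycles Python
-- dies of RecursionError).
def gvA (ins : PySem.Dict String String) : Nat → String → PySem.Dict String Int → Option (Int × PySem.Dict String Int)
  | 0, _, _ => none
  | fuel+1, wire, cache =>
    if PySem.Str.strIsdigit wire then
      (PySem.Int.ofStr? wire).map (fun v => (v, cache))
    else
      match cache.get? wire with
      | some v => some (v, cache)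
      | none =>
        match ins.get? wire with
        | none => none
        | some expr =>
          match PySem.Str.split₀ expr with
          | [t] => (gvA ins fuel t cache).bind (fun r => gvAfinish wire r.1 r.2)
          | [_, t] => (gvA ins fuel t cache).bind (fun r => gvAfinish wire (PySem.Int.band (Int.not r.1) 65535) r.2)
          | [a, op, b] =>
            if op = "AND" then
              (gvA ins fuel a cache).bind (fun r1 => (gvA ins fuel b r1.2).bind (fun r2 =>
                gvAfinish wire (PySem.Int.band r1.1 r2.1) r2.2))
            else if op = "OR" then
              (gvA ins fuel a cache).bind (fun r1 => (gvA ins fuel b r1.2).bind (fun r2 =>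
                gvAfinish wire (PySem.Int.bor r1.1 r2.1) r2.2))
            else if op = "LSHIFT" then
              (gvA ins fuel a cache).bind (fun r1 => (PySem.Int.ofStr? b).bind (fun k =>
                if k < 0 then none else gvAfinish wire (r1.1 <<< k.toNat) r1.2))
            else if op = "RSHIFT" then
              (gvA ins fuel a cache).bind (fun r1 => (PySem.Int.ofStr? b).bind (fun k =>
                if k < 0 then none else gvAfinish wire (r1.1 >>> k.toNat) r1.2))
            else none
          | _ => none

def get_value (wire : String) (instructions : List (String × String)) (cache : List (String × Int)) : Int :=
  match gvA (PySem.Dict.ofList instructions) ((PySem.Dict.ofList instructions).size + 2) wire (PySem.Dict.ofList cache) with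
  | some r => r.1
  | none => 0

-- ===== PORT B =====
-- Source B's resolved(t): already available (a digit literal, or in the value table).
def bRes (T : PySem.Dict String Int) (t : String) : Bool :=
  PySem.Str.strIsdigit t || (T.get? t).isSome

-- Source B's val(t); Option because int(t) is a PySem primitive (some on every digit literal of the domain).
def bVal (T : PySem.Dict String Int) (t : String) : Option Int :=
  if PySem.Str.strIsdigit t then PySem.Int.ofStr? t else T.get? t

-- Source B's try_compute(expr): some v when every operand is available and the expression is well formed.
def bTry (T : PySem.Dict String Int) (expr : String) : Option Int :=
  match PySem.Str.split₀ expr with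
  | [t] => if bRes T t then bVal T t else none
  | [_, t] => if bRes T t then (bVal T t).map (fun v => PySem.Int.band (Int.not v) 65535) else none
  | [a, op, b] =>
    if op = "AND" ∨ op = "OR" then
      if bRes T a && bRes T b then
        (bVal T a).bind (fun va => (bVal T b).map (fun vb =>
          if op = "AND" then PySem.Int.band va vb else PySem.Int.bor va vb))
      else none
    else if op = "LSHIFT" ∨ op = "RSHIFT" then
      if bRes T a then
        match PySem.Int.ofStr? b with
        | none => none
        | some k =>
          if k < 0 then none
          else (bVal T a).map (fun va : Int => if op = "LSHIFT" then (va <<< k.toNat : Int) else (va >>> k.toNat : Int))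
      else none
    else none
  | _ => none

-- one step of Source B's inner `for w, expr in instructions.items()` loop (state: table, progress flag)
def bStep (st : PySem.Dict String Int × Bool) (p : String × String) : PySem.Dict String Int × Bool :=
  if bRes st.1 p.1 then st
  else
    match bTry st.1 p.2 with
    | none => st
    | some v => (st.1.insert p.1 (PySem.Int.band v 65535), true)

-- one full sweep over the instruction items
def bRound (items : List (String × String)) (T : PySem.Dict String Int) : PySem.Dict String Int × Bool :=
  items.foldl bStep (T, false)

-- Source B's outer `for _ in range(len(instructions))` loop with its two breaks
def bRounds (items : List (String × String)) (wire : String) : Nat → PySem.Dict String Int → PySem.Dict String Int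
  | 0, T => T
  | n+1, T =>
    if (T.get? wire).isSome then T
    else
      match bRound items T with
      | (T', true) => bRounds items wire n T'
      | (T', false) => T'

def get_value_alt (wire : String) (instructions : List (String × String)) (cache : List (String × Int)) : Int :=
  if PySem.Str.strIsdigit wire then (PySem.Int.ofStr? wire).getD 0
  else
    ((bRounds (PySem.Dict.ofList instructions).items wire (PySem.Dict.ofList instructions).size
        (PySem.Dict.ofList cache)).get? wire).getD 0

-- ===== PRECONDITION & SPEC =====
-- shift amounts: int(b) must parse and be nonnegative (else Python raises ValueError)
def pvShiftOk (b : String) : Bool :=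
  match PySem.Int.ofStr? b with
  | some k => decide (0 ≤ k)
  | none => false

-- a well-formed expression whose operands all satisfy `res`
def pvExprOk (res : String → Bool) (expr : String) : Bool :=
  match PySem.Str.split₀ expr with
  | [t] => res t
  | [_, t] => res t
  | [a, op, b] =>
    if op = "AND" ∨ op = "OR" then res a && res b
    else if op = "LSHIFT" ∨ op = "RSHIFT" then res a && pvShiftOk b
    else false
  | _ => false

-- the wires resolvable in at most k instruction levels above the digit literals and the cache
def pvResolv (I : PySem.Dict String String) (C : PySem.Dict String Int) : Nat → String → Bool
  | 0, t => if PySem.Str.strIsdigit t then (PySem.Int.ofStr? t).isSome else (C.get? t).isSome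
  | k+1, t =>
    pvResolv I C k t ||
      (!PySem.Str.strIsdigit t &&
        (match I.get? t with
         | some e => pvExprOk (pvResolv I C k) e
         | none => false))

-- Pre_ holds exactly on the inputs where the Python A returns normally: the requested wire is
-- resolvable through the acyclic part of the instruction graph from digit literals and cached
-- wires, every expression on that path well formed with nonnegative parseable shift amounts.
-- Elsewhere A raises KeyError / ValueError (or RecursionError on a cycle) and is excluded.
def Pre_get_value (wire : String) (instructions : List (String × String)) (cache : List (String × Int)) : Prop :=
  pvResolv (PySem.Dict.ofList instructions) (PySem.Dict.ofList cache)
    (PySem.Dict.ofList instructions).size wire = true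
instance (wire : String) (instructions : List (String × String)) (cache : List (String × Int)) : Decidable (Pre_get_value wire instructions cache) := by unfold Pre_get_value; infer_instance

def pvWitness_get_value : String × (List (String × String)) × (List (String × Int)) :=
  ("x", ([("x", "y AND z"), ("y", "NOT w"), ("z", "w LSHIFT 2")], [("w", 7)]))

def Spec_get_value (wire : String) (instructions : List (String × String)) (cache : List (String × Int)) (out : Int) : Prop := out = get_value_alt wire instructions cache
instance (wire : String) (instructions : List (String × String)) (cache : List (String × Int)) (out : Int) : Decidable (Spec_get_value wire instructions cache out) := by unfold Spec_get_value; infer_instance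

-- ===== CLAIM (what is proved, stated in full; the proofs are below) =====
def Claim_equal_get_value : Prop := ∀ (wire : String) (instructions : List (String × String)) (cache : List (String × Int)), Dom_get_value wire instructions cache → Pre_get_value wire instructions cache → Spec_get_value wire instructions cache (get_value wire instructions cache)

-- ===== LEMMAS AND PROOFS =====

-- The pure denotation: evaluate an expression / a wire with a given operand evaluator, masking
-- computed wires exactly where both programs store `val & 0xFFFF`.
def EvExpr (sub : String → Option Int) (e : String) : Option Int :=
  match PySem.Str.split₀ e with
  | [t] => (sub t).map (fun v => PySem.Int.band v 65535)
  | [_, t] => (sub t).map (fun v => PySem.Int.band (PySem.Int.band (Int.not v) 65535) 65535)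
  | [a, op, b] =>
    if op = "AND" then (sub a).bind (fun va => (sub b).map (fun vb => PySem.Int.band (PySem.Int.band va vb) 65535))
    else if op = "OR" then (sub a).bind (fun va => (sub b).map (fun vb => PySem.Int.band (PySem.Int.bor va vb) 65535))
    else if op = "LSHIFT" then (sub a).bind (fun va => (PySem.Int.ofStr? b).bind (fun k => if k < 0 then none else some (PySem.Int.band (va <<< k.toNat) 65535)))
    else if op = "RSHIFT" then (sub a).bind (fun va => (PySem.Int.ofStr? b).bind (fun k => if k < 0 then none else some (PySem.Int.band (va >>> k.toNat) 65535)))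
    else none
  | _ => none

def Ev (I : PySem.Dict String String) (C : PySem.Dict String Int) : Nat → String → Option Int
  | 0, _ => none
  | f+1, w =>
    if PySem.Str.strIsdigit w then PySem.Int.ofStr? w
    else
      match C.get? w with
      | some v => some v
      | none => (I.get? w).bind (EvExpr (Ev I C f))

theorem EvExpr_mono {s1 s2 : String → Option Int}
    (h : ∀ t v, s1 t = some v → s2 t = some v) (e : String) (v : Int)
    (he : EvExpr s1 e = some v) : EvExpr s2 e = some v := by
  rcases hts : PySem.Str.split₀ e with _ | ⟨t1, _ | ⟨t2, _ | ⟨t3, _ | ⟨t4, r⟩⟩⟩⟩ <;>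
    simp only [EvExpr, hts] at he ⊢
  · exact absurd he (by simp)
  · rcases hs : s1 t1 with _ | u
    · rw [hs] at he; exact absurd he (by simp)
    · rw [hs] at he; rw [h t1 u hs]; exact he
  · rcases hs : s1 t2 with _ | u
    · rw [hs] at he; exact absurd he (by simp)
    · rw [hs] at he; rw [h t2 u hs]; exact he
  · by_cases h1 : t2 = "AND"
    · rw [if_pos h1] at he ⊢
      rcases hs : s1 t1 with _ | u
      · rw [hs] at he; exact absurd he (by simp)
      · rw [hs] at he
        rcases hs3 : s1 t3 with _ | u3
        · rw [hs3] at he; exact absurd he (by simp)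
        · rw [hs3] at he; rw [h t1 u hs, h t3 u3 hs3]; exact he
    · rw [if_neg h1] at he ⊢
      by_cases h2 : t2 = "OR"
      · rw [if_pos h2] at he ⊢
        rcases hs : s1 t1 with _ | u
        · rw [hs] at he; exact absurd he (by simp)
        · rw [hs] at he
          rcases hs3 : s1 t3 with _ | u3
          · rw [hs3] at he; exact absurd he (by simp)
          · rw [hs3] at he; rw [h t1 u hs, h t3 u3 hs3]; exact he
      · rw [if_neg h2] at he ⊢
        by_cases h3 : t2 = "LSHIFT"
        · rw [if_pos h3] at he ⊢
          rcases hs : s1 t1 with _ | u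
          · rw [hs] at he; exact absurd he (by simp)
          · rw [hs] at he; rw [h t1 u hs]; exact he
        · rw [if_neg h3] at he ⊢
          by_cases h4 : t2 = "RSHIFT"
          · rw [if_pos h4] at he ⊢
            rcases hs : s1 t1 with _ | u
            · rw [hs] at he; exact absurd he (by simp)
            · rw [hs] at he; rw [h t1 u hs]; exact he
          · rw [if_neg h4] at he; exact absurd he (by simp)
  · exact absurd he (by simp)

theorem Ev_mono (I : PySem.Dict String String) (C : PySem.Dict String Int) (f : Nat) :
    ∀ w v, Ev I C f w = some v → Ev I C (f+1) w = some v := by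
  induction f with
  | zero => intro w v h; exact absurd h (by simp [Ev])
  | succ f ih =>
    intro w v h
    rw [Ev] at h ⊢
    by_cases hd : PySem.Str.strIsdigit w = true
    · rwa [if_pos hd] at h ⊢
    · rw [if_neg hd] at h ⊢
      rcases hC : C.get? w with _ | c
      · simp only [hC] at h ⊢
        rcases hI : I.get? w with _ | e <;>
          simp only [hI, Option.bind_none, Option.bind_some] at h ⊢
        · exact absurd h (by simp)
        · exact EvExpr_mono ih e v h
      · simp only [hC] at h ⊢; exact h

theorem Ev_le (I : PySem.Dict String String) (C : PySem.Dict String Int) {f g : Nat}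
    (hfg : f ≤ g) {w : String} {v : Int} (h : Ev I C f w = some v) : Ev I C g w = some v := by
  induction hfg with
  | refl => exact h
  | step _ ih => exact Ev_mono I C _ w v ih

theorem Ev_det (I : PySem.Dict String String) (C : PySem.Dict String Int) {f g : Nat}
    {w : String} {v v' : Int} (h : Ev I C f w = some v) (h' : Ev I C g w = some v') : v = v' := by
  rcases Nat.le_total f g with hle | hle
  · have h2 := Ev_le I C hle h; rw [h2] at h'; exact Option.some_inj.mp h'
  · have h2 := Ev_le I C hle h'; rw [h2] at h; exact (Option.some_inj.mp h).symm

-- cache states reachable by A: the original entries unchanged, every new entry a denotation value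
def GE (I : PySem.Dict String String) (C D : PySem.Dict String Int) : Prop :=
  (∀ w v, C.get? w = some v → D.get? w = some v) ∧
  (∀ w, C.get? w = none → D.get? w = none ∨ ∃ v f, Ev I C f w = some v ∧ D.get? w = some v)

theorem GE_refl (I : PySem.Dict String String) (C : PySem.Dict String Int) : GE I C C :=
  ⟨fun _ _ h => h, fun _ h => Or.inl h⟩

theorem GE_insert (I : PySem.Dict String String) (C D : PySem.Dict String Int)
    (hGE : GE I C D) {w : String} {m : Int} {f : Nat}
    (hC : C.get? w = none) (hEv : Ev I C f w = some m) : GE I C (D.insert w m) := by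
  constructor
  · intro w' v' hCv
    rcases eq_or_ne w' w with rfl | hne
    · rw [hCv] at hC; cases hC
    · rw [PySem.Dict.get?_insert, if_neg hne]; exact hGE.1 w' v' hCv
  · intro w' hCn
    rcases eq_or_ne w' w with rfl | hne
    · exact Or.inr ⟨m, f, hEv, by rw [PySem.Dict.get?_insert_self]⟩
    · rw [PySem.Dict.get?_insert, if_neg hne]; exact hGE.2 w' hCn

-- A's run from any reachable cache state returns the denotation and stays reachable
theorem gvA_sim (I : PySem.Dict String String) (C : PySem.Dict String Int) :
    ∀ f {g w v D}, f ≤ g → GE I C D → Ev I C f w = some v →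
      ∃ D', gvA I g w D = some (v, D') ∧ GE I C D' := by
  intro f
  induction f with
  | zero => intro g w v D _ _ hev; exact absurd hev (by simp [Ev])
  | succ f ih =>
    intro g w v D hfg hGE hev
    obtain ⟨g, rfl⟩ : ∃ g', g = g' + 1 := ⟨g - 1, by omega⟩
    have hfg' : f ≤ g := by omega
    have hevfull := hev
    rw [Ev] at hev
    rw [gvA]
    by_cases hd : PySem.Str.strIsdigit w = true
    · rw [if_pos hd] at hev ⊢
      rw [hev]
      exact ⟨D, by simp, hGE⟩
    · rw [if_neg hd] at hev ⊢
      rcases hC : C.get? w with _ | c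
      · simp only [hC] at hev ⊢
        rcases hDw : D.get? w with _ | v'
        · rcases hI : I.get? w with _ | e
          · rw [hI] at hev; exact absurd hev (by simp)
          · simp only [hI, Option.bind_some] at hev ⊢
            rcases hts : PySem.Str.split₀ e with _ | ⟨t1, _ | ⟨t2, _ | ⟨t3, _ | ⟨t4, r⟩⟩⟩⟩ <;>
              simp only [EvExpr, hts] at hev ⊢
            · exact absurd hev (by simp)
            · -- passthrough
              rcases hs : Ev I C f t1 with _ | u
              · rw [hs] at hev; exact absurd hev (by simp)
              · rw [hs] at hev; simp only [Option.map_some] at hev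
                have hv := (Option.some_inj.mp hev).symm
                subst hv
                obtain ⟨D1, hA1, hGE1⟩ := ih hfg' hGE hs
                exact ⟨D1.insert w (PySem.Int.band u 65535), by simp [hA1, gvAfinish],
                  GE_insert I C D1 hGE1 hC hevfull⟩
            · -- NOT
              rcases hs : Ev I C f t2 with _ | u
              · rw [hs] at hev; exact absurd hev (by simp)
              · rw [hs] at hev; simp only [Option.map_some] at hev
                have hv := (Option.some_inj.mp hev).symm
                subst hv
                obtain ⟨D1, hA1, hGE1⟩ := ih hfg' hGE hs
                exact ⟨D1.insert w (PySem.Int.band (PySem.Int.band (Int.not u) 65535) 65535),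
                  by simp [hA1, gvAfinish], GE_insert I C D1 hGE1 hC hevfull⟩
            · -- binary operator
              by_cases h1 : t2 = "AND"
              · rw [if_pos h1] at hev ⊢
                rcases hs : Ev I C f t1 with _ | u1
                · rw [hs] at hev; exact absurd hev (by simp)
                · rw [hs] at hev
                  rcases hs3 : Ev I C f t3 with _ | u3
                  · rw [hs3] at hev; exact absurd hev (by simp)
                  · rw [hs3] at hev
                    simp only [Option.bind_some, Option.map_some] at hev
                    have hv := (Option.some_inj.mp hev).symm
                    subst hv
                    obtain ⟨D1, hA1, hGE1⟩ := ih hfg' hGE hs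
                    obtain ⟨D2, hA2, hGE2⟩ := ih hfg' hGE1 hs3
                    exact ⟨D2.insert w (PySem.Int.band (PySem.Int.band u1 u3) 65535),
                      by simp [hA1, hA2, gvAfinish], GE_insert I C D2 hGE2 hC hevfull⟩
              · rw [if_neg h1] at hev ⊢
                by_cases h2 : t2 = "OR"
                · rw [if_pos h2] at hev ⊢
                  rcases hs : Ev I C f t1 with _ | u1
                  · rw [hs] at hev; exact absurd hev (by simp)
                  · rw [hs] at hev
                    rcases hs3 : Ev I C f t3 with _ | u3
                    · rw [hs3] at hev; exact absurd hev (by simp)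
                    · rw [hs3] at hev
                      simp only [Option.bind_some, Option.map_some] at hev
                      have hv := (Option.some_inj.mp hev).symm
                      subst hv
                      obtain ⟨D1, hA1, hGE1⟩ := ih hfg' hGE hs
                      obtain ⟨D2, hA2, hGE2⟩ := ih hfg' hGE1 hs3
                      exact ⟨D2.insert w (PySem.Int.band (PySem.Int.bor u1 u3) 65535),
                        by simp [hA1, hA2, gvAfinish], GE_insert I C D2 hGE2 hC hevfull⟩
                · rw [if_neg h2] at hev ⊢
                  by_cases h3 : t2 = "LSHIFT"
                  · rw [if_pos h3] at hev ⊢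
                    rcases hs : Ev I C f t1 with _ | u1
                    · rw [hs] at hev; exact absurd hev (by simp)
                    · rw [hs] at hev
                      rcases hk : PySem.Int.ofStr? t3 with _ | k
                      · rw [hk] at hev; exact absurd hev (by simp)
                      · rw [hk] at hev
                        simp only [Option.bind_some] at hev
                        by_cases hneg : k < 0
                        · rw [if_pos hneg] at hev; exact absurd hev (by simp)
                        · rw [if_neg hneg] at hev
                          have hv := (Option.some_inj.mp hev).symm
                          subst hv
                          obtain ⟨D1, hA1, hGE1⟩ := ih hfg' hGE hs
                          exact ⟨D1.insert w (PySem.Int.band (u1 <<< k.toNat) 65535),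
                            by simp [hA1, hneg, gvAfinish], GE_insert I C D1 hGE1 hC hevfull⟩
                  · rw [if_neg h3] at hev ⊢
                    by_cases h4 : t2 = "RSHIFT"
                    · rw [if_pos h4] at hev ⊢
                      rcases hs : Ev I C f t1 with _ | u1
                      · rw [hs] at hev; exact absurd hev (by simp)
                      · rw [hs] at hev
                        rcases hk : PySem.Int.ofStr? t3 with _ | k
                        · rw [hk] at hev; exact absurd hev (by simp)
                        · rw [hk] at hev
                          simp only [Option.bind_some] at hev
                          by_cases hneg : k < 0
                          · rw [if_pos hneg] at hev; exact absurd hev (by simp)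
                          · rw [if_neg hneg] at hev
                            have hv := (Option.some_inj.mp hev).symm
                            subst hv
                            obtain ⟨D1, hA1, hGE1⟩ := ih hfg' hGE hs
                            exact ⟨D1.insert w (PySem.Int.band (u1 >>> k.toNat) 65535),
                              by simp [hA1, hneg, gvAfinish], GE_insert I C D1 hGE1 hC hevfull⟩
                    · rw [if_neg h4] at hev; exact absurd hev (by simp)
            · exact absurd hev (by simp)
        · rcases hGE.2 w hC with hnone | ⟨v2, f2, hev2, hsome⟩
          · rw [hnone] at hDw; cases hDw
          · rw [hsome] at hDw
            have hv2 : v2 = v' := Option.some_inj.mp hDw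
            have hv : v2 = v := Ev_det I C hev2 hevfull
            exact ⟨D, by rw [← hv2, hv], hGE⟩
      · simp only [hC] at hev
        have hv := Option.some_inj.mp hev
        have hD := hGE.1 w c hC
        simp only [hD]
        exact ⟨D, by rw [← hv], hGE⟩

-- resolvable digit literals parse
theorem Resolv_digit (I : PySem.Dict String String) (C : PySem.Dict String Int) :
    ∀ k w, pvResolv I C k w = true → PySem.Str.strIsdigit w = true → (PySem.Int.ofStr? w).isSome := by
  intro k
  induction k with
  | zero => intro w h hd; rw [pvResolv, if_pos hd] at h; exact h
  | succ k ih =>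
    intro w h hd
    rw [pvResolv] at h
    rcases Bool.or_eq_true_iff.mp h with h | h
    · exact ih w h hd
    · rw [hd] at h; exact absurd h (by simp)

-- a well-formed expression over evaluable operands evaluates
theorem EvExpr_ok (sub : String → Option Int) (res : String → Bool) (e : String)
    (hsub : ∀ t, res t = true → (sub t).isSome) (he : pvExprOk res e = true) :
    (EvExpr sub e).isSome := by
  rcases hts : PySem.Str.split₀ e with _ | ⟨t1, _ | ⟨t2, _ | ⟨t3, _ | ⟨t4, r⟩⟩⟩⟩ <;>
    simp only [pvExprOk, hts] at he <;> simp only [EvExpr, hts]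
  · exact absurd he (by simp)
  · obtain ⟨u, hu⟩ := Option.isSome_iff_exists.mp (hsub t1 he); simp [hu]
  · obtain ⟨u, hu⟩ := Option.isSome_iff_exists.mp (hsub t2 he); simp [hu]
  · by_cases h12 : t2 = "AND" ∨ t2 = "OR"
    · rw [if_pos h12] at he
      obtain ⟨he1, he3⟩ := Bool.and_eq_true_iff.mp he
      obtain ⟨u1, hu1⟩ := Option.isSome_iff_exists.mp (hsub t1 he1)
      obtain ⟨u3, hu3⟩ := Option.isSome_iff_exists.mp (hsub t3 he3)
      rcases h12 with h | h <;> subst h <;> simp [hu1, hu3]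
    · rw [if_neg h12] at he
      by_cases h34 : t2 = "LSHIFT" ∨ t2 = "RSHIFT"
      · rw [if_pos h34] at he
        obtain ⟨he1, hsh⟩ := Bool.and_eq_true_iff.mp he
        obtain ⟨u1, hu1⟩ := Option.isSome_iff_exists.mp (hsub t1 he1)
        rw [pvShiftOk] at hsh
        rcases hk : PySem.Int.ofStr? t3 with _ | k <;> rw [hk] at hsh
        · exact absurd hsh (by simp)
        · have hkn : ¬ k < 0 := by simpa using of_decide_eq_true hsh
          have hne1 : ¬ t2 = "AND" := fun hh => h12 (Or.inl hh)
          have hne2 : ¬ t2 = "OR" := fun hh => h12 (Or.inr hh)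
          rcases h34 with h | h <;> subst h <;> simp [hu1, hkn]
      · rw [if_neg h34] at he; exact absurd he (by simp)
  · exact absurd he (by simp)

-- resolvable wires have a denotation
theorem Resolv_Ev (I : PySem.Dict String String) (C : PySem.Dict String Int) :
    ∀ k w, pvResolv I C k w = true → ∃ v, Ev I C (k+1) w = some v := by
  intro k
  induction k with
  | zero =>
    intro w h
    rw [pvResolv] at h
    by_cases hd : PySem.Str.strIsdigit w = true
    · rw [if_pos hd] at h
      obtain ⟨v, hv⟩ := Option.isSome_iff_exists.mp h
      exact ⟨v, by rw [Ev, if_pos hd]; exact hv⟩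
    · rw [if_neg hd] at h
      obtain ⟨v, hv⟩ := Option.isSome_iff_exists.mp h
      exact ⟨v, by rw [Ev, if_neg hd]; simp only [hv]⟩
  | succ k ih =>
    intro w h
    rw [pvResolv] at h
    rcases Bool.or_eq_true_iff.mp h with h | h
    · obtain ⟨v, hv⟩ := ih w h
      exact ⟨v, Ev_mono I C (k+1) w v hv⟩
    · obtain ⟨hd, hrest⟩ := Bool.and_eq_true_iff.mp h
      have hd' : ¬ PySem.Str.strIsdigit w = true := by simpa using hd
      rcases hI : I.get? w with _ | e <;> rw [hI] at hrest
      · exact absurd hrest (by simp)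
      · rcases hC : C.get? w with _ | c
        · have hok : (EvExpr (Ev I C (k+1)) e).isSome := by
            refine EvExpr_ok _ (pvResolv I C k) e ?_ hrest
            intro t ht
            obtain ⟨v, hv⟩ := ih t ht
            exact Option.isSome_iff_exists.mpr ⟨v, hv⟩
          obtain ⟨v, hv⟩ := Option.isSome_iff_exists.mp hok
          refine ⟨v, ?_⟩
          rw [Ev, if_neg hd']
          simp only [hC, hI, Option.bind_some]
          exact hv
        · exact ⟨c, by rw [Ev, if_neg hd']; simp only [hC]⟩

-- B's table invariant: original cache entries kept verbatim, computed entries denotation values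
def TInv (I : PySem.Dict String String) (C T : PySem.Dict String Int) : Prop :=
  (∀ w v, C.get? w = some v → T.get? w = some v) ∧
  (∀ w v, T.get? w = some v → C.get? w = some v ∨ ∃ f, Ev I C f w = some v)

theorem bVal_sound (I : PySem.Dict String String) (C T : PySem.Dict String Int)
    (hT : TInv I C T) (t : String) (v : Int) (h : bVal T t = some v) :
    ∃ f, Ev I C f t = some v := by
  by_cases hd : PySem.Str.strIsdigit t = true
  · rw [bVal, if_pos hd] at h
    exact ⟨1, by rw [show (1:Nat) = 0 + 1 from rfl, Ev, if_pos hd]; exact h⟩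
  · rw [bVal, if_neg hd] at h
    rcases hT.2 t v h with hc | hf
    · exact ⟨1, by rw [show (1:Nat) = 0 + 1 from rfl, Ev, if_neg hd]; simp only [hc]⟩
    · exact hf

-- bVal availability implies the resolved flag
theorem bRes_of_bVal (T : PySem.Dict String Int) (t : String) (h : (bVal T t).isSome) :
    bRes T t = true := by
  by_cases hd : PySem.Str.strIsdigit t = true
  · rw [bRes, hd]; rfl
  · rw [bVal, if_neg hd] at h
    rw [bRes]
    simp [h]

-- whatever try_compute returns is (after masking) the denotation of the expression
theorem bTry_sound (I : PySem.Dict String String) (C T : PySem.Dict String Int)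
    (hT : TInv I C T) (e : String) (v : Int) (h : bTry T e = some v) :
    ∃ f, EvExpr (Ev I C f) e = some (PySem.Int.band v 65535) := by
  rcases hts : PySem.Str.split₀ e with _ | ⟨t1, _ | ⟨t2, _ | ⟨t3, _ | ⟨t4, r⟩⟩⟩⟩ <;>
    simp only [bTry, hts] at h
  · exact absurd h (by simp)
  · -- [t] : passthrough
    rcases hr : bRes T t1 with _ | _ <;> simp only [hr] at h
    · simp at h
    · simp only [if_true] at h
      obtain ⟨f, hf⟩ := bVal_sound I C T hT t1 v h
      exact ⟨f, by simp only [EvExpr, hts, hf, Option.map_some]⟩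
  · -- NOT
    rcases hr : bRes T t2 with _ | _ <;> simp only [hr] at h
    · simp at h
    · simp only [if_true] at h
      rcases hu : bVal T t2 with _ | u
      · rw [hu] at h; exact absurd h (by simp)
      · rw [hu] at h; simp only [Option.map_some] at h
        obtain ⟨f, hf⟩ := bVal_sound I C T hT t2 u hu
        refine ⟨f, ?_⟩
        simp only [EvExpr, hts, hf, Option.map_some]
        rw [Option.some_inj.mp h]; try simp
  · -- binary operator
    by_cases hA : t2 = "AND"
    · subst hA
      rw [if_pos (Or.inl rfl)] at h
      rcases hr : (bRes T t1 && bRes T t3) with _ | _ <;> simp only [hr] at h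
      · simp at h
      · simp only [if_true] at h
        rcases hu1 : bVal T t1 with _ | u1
        · rw [hu1] at h; exact absurd h (by simp)
        · rw [hu1] at h
          rcases hu3 : bVal T t3 with _ | u3
          · rw [hu3] at h; exact absurd h (by simp)
          · rw [hu3] at h
            simp only [Option.bind_some, Option.map_some] at h
            obtain ⟨f1, hf1⟩ := bVal_sound I C T hT t1 u1 hu1
            obtain ⟨f3, hf3⟩ := bVal_sound I C T hT t3 u3 hu3
            refine ⟨max f1 f3, ?_⟩
            have hf1' := Ev_le I C (Nat.le_max_left f1 f3) hf1
            have hf3' := Ev_le I C (Nat.le_max_right f1 f3) hf3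
            simp only [EvExpr, hts, hf1', hf3', Option.bind_some, Option.map_some]
            rw [Option.some_inj.mp h]; try simp
    · by_cases hO : t2 = "OR"
      · subst hO
        rw [if_pos (Or.inr rfl)] at h
        rcases hr : (bRes T t1 && bRes T t3) with _ | _ <;> simp only [hr] at h
        · simp at h
        · simp only [if_true] at h
          rcases hu1 : bVal T t1 with _ | u1
          · rw [hu1] at h; exact absurd h (by simp)
          · rw [hu1] at h
            rcases hu3 : bVal T t3 with _ | u3
            · rw [hu3] at h; exact absurd h (by simp)
            · rw [hu3] at h
              simp only [Option.bind_some, Option.map_some,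
                if_neg (by decide : ¬ ("OR" : String) = "AND")] at h
              obtain ⟨f1, hf1⟩ := bVal_sound I C T hT t1 u1 hu1
              obtain ⟨f3, hf3⟩ := bVal_sound I C T hT t3 u3 hu3
              refine ⟨max f1 f3, ?_⟩
              have hf1' := Ev_le I C (Nat.le_max_left f1 f3) hf1
              have hf3' := Ev_le I C (Nat.le_max_right f1 f3) hf3
              simp only [EvExpr, hts, if_neg (by decide : ¬ ("OR" : String) = "AND"),
                hf1', hf3', Option.bind_some, Option.map_some]
              rw [Option.some_inj.mp h]; try simp
      · rw [if_neg (by tauto)] at h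
        by_cases hL : t2 = "LSHIFT"
        · subst hL
          rw [if_pos (Or.inl rfl)] at h
          rcases hr : bRes T t1 with _ | _ <;> simp only [hr] at h
          · simp at h
          · simp only [if_true] at h
            rcases hk : PySem.Int.ofStr? t3 with _ | k <;> simp only [hk] at h
            · exact absurd h (by simp)
            · by_cases hneg : k < 0
              · rw [if_pos hneg] at h; exact absurd h (by simp)
              · rw [if_neg hneg] at h
                rcases hu1 : bVal T t1 with _ | u1
                · rw [hu1] at h; exact absurd h (by simp)
                · rw [hu1] at h
                  simp only [Option.map_some] at h
                  obtain ⟨f1, hf1⟩ := bVal_sound I C T hT t1 u1 hu1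
                  refine ⟨f1, ?_⟩
                  simp only [EvExpr, hts, if_neg (by tauto : ¬ ("LSHIFT" : String) = "AND"),
                    if_neg (by tauto : ¬ ("LSHIFT" : String) = "OR"), hf1, hk,
                    Option.bind_some, if_neg hneg]
                  rw [Option.some_inj.mp h]; try simp
        · by_cases hR : t2 = "RSHIFT"
          · subst hR
            rw [if_pos (Or.inr rfl)] at h
            rcases hr : bRes T t1 with _ | _ <;> simp only [hr] at h
            · simp at h
            · simp only [if_true] at h
              rcases hk : PySem.Int.ofStr? t3 with _ | k <;> simp only [hk] at h
              · exact absurd h (by simp)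
              · by_cases hneg : k < 0
                · rw [if_pos hneg] at h; exact absurd h (by simp)
                · rw [if_neg hneg] at h
                  rcases hu1 : bVal T t1 with _ | u1
                  · rw [hu1] at h; exact absurd h (by simp)
                  · rw [hu1] at h
                    simp only [Option.map_some,
                      if_neg (by decide : ¬ ("RSHIFT" : String) = "LSHIFT")] at h
                    obtain ⟨f1, hf1⟩ := bVal_sound I C T hT t1 u1 hu1
                    refine ⟨f1, ?_⟩
                    simp only [EvExpr, hts, if_neg (by tauto : ¬ ("RSHIFT" : String) = "AND"),
                      if_neg (by tauto : ¬ ("RSHIFT" : String) = "OR"),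
                      if_neg (by tauto : ¬ ("RSHIFT" : String) = "LSHIFT"), hf1, hk,
                      Option.bind_some, if_neg hneg]
                    rw [Option.some_inj.mp h]; try simp
          · rw [if_neg (by tauto)] at h; exact absurd h (by simp)
  · exact absurd h (by simp)

-- operands available in the table make try_compute succeed
theorem bTry_ok (T : PySem.Dict String Int) (res : String → Bool) (e : String)
    (hres : ∀ t, res t = true → (bVal T t).isSome) (he : pvExprOk res e = true) :
    (bTry T e).isSome := by
  rcases hts : PySem.Str.split₀ e with _ | ⟨t1, _ | ⟨t2, _ | ⟨t3, _ | ⟨t4, r⟩⟩⟩⟩ <;>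
    simp only [pvExprOk, hts] at he <;> simp only [bTry, hts]
  · exact absurd he (by simp)
  · rw [if_pos (bRes_of_bVal T t1 (hres t1 he))]; exact hres t1 he
  · rw [if_pos (bRes_of_bVal T t2 (hres t2 he))]
    obtain ⟨u, hu⟩ := Option.isSome_iff_exists.mp (hres t2 he)
    simp [hu]
  · by_cases h12 : t2 = "AND" ∨ t2 = "OR"
    · rw [if_pos h12] at he ⊢
      obtain ⟨he1, he3⟩ := Bool.and_eq_true_iff.mp he
      obtain ⟨u1, hu1⟩ := Option.isSome_iff_exists.mp (hres t1 he1)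
      obtain ⟨u3, hu3⟩ := Option.isSome_iff_exists.mp (hres t3 he3)
      rw [if_pos (by rw [bRes_of_bVal T t1 (hres t1 he1), bRes_of_bVal T t3 (hres t3 he3)]; rfl)]
      simp [hu1, hu3]
    · rw [if_neg h12] at he ⊢
      by_cases h34 : t2 = "LSHIFT" ∨ t2 = "RSHIFT"
      · rw [if_pos h34] at he ⊢
        obtain ⟨he1, hsh⟩ := Bool.and_eq_true_iff.mp he
        obtain ⟨u1, hu1⟩ := Option.isSome_iff_exists.mp (hres t1 he1)
        rw [pvShiftOk] at hsh
        rcases hk : PySem.Int.ofStr? t3 with _ | k <;> rw [hk] at hsh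
        · exact absurd hsh (by simp)
        · have hkn : ¬ k < 0 := by simpa using of_decide_eq_true hsh
          rw [if_pos (bRes_of_bVal T t1 (hres t1 he1))]
          simp [hkn, hu1]
      · rw [if_neg h34] at he; exact absurd he (by simp)
  · exact absurd he (by simp)

-- the sweep only adds entries
theorem bStep_keep (st : PySem.Dict String Int × Bool) (p : String × String)
    (t : String) (v : Int) (h : st.1.get? t = some v) : (bStep st p).1.get? t = some v := by
  rw [bStep]
  by_cases hr : bRes st.1 p.1 = true
  · rw [if_pos hr]; exact h
  · rw [if_neg hr]
    rcases hb : bTry st.1 p.2 with _ | u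
    · exact h
    · have hne : t ≠ p.1 := by
        intro heq; subst heq
        exact hr (by rw [bRes]; simp [h])
      rw [PySem.Dict.get?_insert, if_neg hne]; exact h

theorem bFoldl_keep : ∀ (l : List (String × String)) (st : PySem.Dict String Int × Bool)
    (t : String) (v : Int), st.1.get? t = some v → (l.foldl bStep st).1.get? t = some v := by
  intro l
  induction l with
  | nil => intro st t v h; exact h
  | cons p l ih => intro st t v h; exact ih _ _ _ (bStep_keep st p t v h)

theorem bRes_keep (l : List (String × String)) (st : PySem.Dict String Int × Bool)
    (t : String) (h : bRes st.1 t = true) : bRes (l.foldl bStep st).1 t = true := by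
  rw [bRes] at h ⊢
  rcases Bool.or_eq_true_iff.mp h with h | h
  · rw [Bool.or_eq_true_iff]; exact Or.inl h
  · obtain ⟨v, hv⟩ := Option.isSome_iff_exists.mp h
    rw [Bool.or_eq_true_iff]
    exact Or.inr (by simp [bFoldl_keep l st t v hv])

-- the sweep preserves the table invariant
theorem bStep_inv (I : PySem.Dict String String) (C : PySem.Dict String Int)
    (hnd : I.keys.Nodup) (st : PySem.Dict String Int × Bool) (p : String × String)
    (hp : p ∈ I.items) (hT : TInv I C st.1) : TInv I C (bStep st p).1 := by
  rw [bStep]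
  by_cases hr : bRes st.1 p.1 = true
  · rw [if_pos hr]; exact hT
  · rw [if_neg hr]
    rcases hb : bTry st.1 p.2 with _ | u
    · exact hT
    · have hrT : st.1.get? p.1 = none := by
        rcases ht : st.1.get? p.1 with _ | x
        · rfl
        · exact absurd (by rw [bRes]; simp [ht]) hr
      have hCnone : C.get? p.1 = none := by
        rcases hc : C.get? p.1 with _ | x
        · rfl
        · rw [hT.1 p.1 x hc] at hrT; cases hrT
      have hdig : ¬ PySem.Str.strIsdigit p.1 = true := by
        intro hd; exact hr (by rw [bRes, hd]; rfl)
      obtain ⟨f, hf⟩ := bTry_sound I C st.1 hT p.2 u hb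
      have hI : I.get? p.1 = some p.2 := PySem.Dict.get?_of_mem_items I hp hnd
      have hEv : Ev I C (f+1) p.1 = some (PySem.Int.band u 65535) := by
        rw [Ev, if_neg hdig]
        simp only [hCnone, hI, Option.bind_some]
        exact hf
      constructor
      · intro w v hc
        have hne : w ≠ p.1 := by intro heq; subst heq; rw [hc] at hCnone; cases hCnone
        rw [PySem.Dict.get?_insert, if_neg hne]; exact hT.1 w v hc
      · intro w v hv
        rcases eq_or_ne w p.1 with rfl | hne
        · rw [PySem.Dict.get?_insert_self] at hv
          exact Or.inr ⟨f+1, hv ▸ hEv⟩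
        · rw [PySem.Dict.get?_insert, if_neg hne] at hv; exact hT.2 w v hv

theorem bFoldl_inv (I : PySem.Dict String String) (C : PySem.Dict String Int)
    (hnd : I.keys.Nodup) :
    ∀ (l : List (String × String)) (st : PySem.Dict String Int × Bool),
      (∀ p ∈ l, p ∈ I.items) → TInv I C st.1 → TInv I C (l.foldl bStep st).1 := by
  intro l
  induction l with
  | nil => intro st _ hT; exact hT
  | cons p l ih =>
    intro st hl hT
    exact ih _ (fun q hq => hl q (List.mem_cons_of_mem p hq))
      (bStep_inv I C hnd st p (hl p List.mem_cons_self) hT)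

-- the progress flag only ever goes up
theorem bStep_flag (st : PySem.Dict String Int × Bool) (p : String × String)
    (h : st.2 = true) : (bStep st p).2 = true := by
  rw [bStep]
  by_cases hr : bRes st.1 p.1 = true
  · rw [if_pos hr]; exact h
  · rw [if_neg hr]
    rcases hb : bTry st.1 p.2 with _ | u
    · exact h
    · rfl

theorem bFoldl_flag : ∀ (l : List (String × String)) (st : PySem.Dict String Int × Bool),
    st.2 = true → (l.foldl bStep st).2 = true := by
  intro l
  induction l with
  | nil => intro st h; exact h
  | cons p l ih => intro st h; exact ih _ (bStep_flag st p h)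

-- a sweep that reports no progress changed nothing and could compute nothing
theorem bFoldl_no_progress : ∀ (l : List (String × String)) (st : PySem.Dict String Int × Bool),
    (l.foldl bStep st).2 = false →
      l.foldl bStep st = st ∧ ∀ p ∈ l, bRes st.1 p.1 = true ∨ bTry st.1 p.2 = none := by
  intro l
  induction l with
  | nil => intro st _; exact ⟨rfl, by intro p hp; cases hp⟩
  | cons p l ih =>
    intro st h
    rw [List.foldl_cons] at h
    by_cases hr : bRes st.1 p.1 = true
    · have hstep : bStep st p = st := by rw [bStep, if_pos hr]
      rw [hstep] at h
      obtain ⟨h1, h2⟩ := ih st h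
      refine ⟨by rw [List.foldl_cons, hstep, h1], ?_⟩
      intro q hq
      rcases List.mem_cons.mp hq with rfl | hq'
      · exact Or.inl hr
      · exact h2 q hq'
    · rcases hb : bTry st.1 p.2 with _ | u
      · have hstep : bStep st p = st := by rw [bStep, if_neg hr]; simp only [hb]
        rw [hstep] at h
        obtain ⟨h1, h2⟩ := ih st h
        refine ⟨by rw [List.foldl_cons, hstep, h1], ?_⟩
        intro q hq
        rcases List.mem_cons.mp hq with rfl | hq'
        · exact Or.inr hb
        · exact h2 q hq'
      · exfalso
        have hflag : (bStep st p).2 = true := by rw [bStep, if_neg hr]; simp only [hb]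
        have := bFoldl_flag l (bStep st p) hflag
        rw [h] at this; cases this

-- a listed wire whose expression stays computable is resolved by the sweep
theorem bFoldl_hits : ∀ (l : List (String × String)) (st : PySem.Dict String Int × Bool)
    (w e : String), (w, e) ∈ l →
    (∀ T', (∀ t v, st.1.get? t = some v → T'.get? t = some v) →
        bRes T' w = true ∨ (bTry T' e).isSome = true) →
    bRes (l.foldl bStep st).1 w = true := by
  intro l
  induction l with
  | nil => intro st w e hmem; cases hmem
  | cons p l ih =>
    intro st w e hmem H
    rw [List.foldl_cons]
    rcases List.mem_cons.mp hmem with heq | hmem'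
    · obtain rfl := heq.symm
      rcases H st.1 (fun _ _ h => h) with hres | hsome
      · have hstep : bStep st (w, e) = st := by rw [bStep, if_pos hres]
        rw [hstep]; exact bRes_keep l st w hres
      · by_cases hr : bRes st.1 w = true
        · have hstep : bStep st (w, e) = st := by rw [bStep, if_pos hr]
          rw [hstep]; exact bRes_keep l st w hr
        · obtain ⟨u, hu⟩ := Option.isSome_iff_exists.mp hsome
          have hstep : bStep st (w, e) = (st.1.insert w (PySem.Int.band u 65535), true) := by
            rw [bStep, if_neg hr]; simp only [hu]
          rw [hstep]
          apply bRes_keep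
          rw [bRes]; simp [PySem.Dict.get?_insert_self]
    · exact ih (bStep st p) w e hmem'
        (fun T' hgrow => H T' (fun t v hv => hgrow t v (bStep_keep st p t v hv)))

-- coverage: every wire resolvable in k levels is available in the table
def Cov (I : PySem.Dict String String) (C T : PySem.Dict String Int) (k : Nat) : Prop :=
  ∀ w, pvResolv I C k w = true → bRes T w = true

-- operand availability extracted from coverage (monotone in the table)
theorem Cov_bVal (I : PySem.Dict String String) (C T T' : PySem.Dict String Int) (k : Nat)
    (hcov : Cov I C T k) (hgrow : ∀ t v, T.get? t = some v → T'.get? t = some v)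
    (t : String) (ht : pvResolv I C k t = true) : (bVal T' t).isSome := by
  by_cases hd : PySem.Str.strIsdigit t = true
  · rw [bVal, if_pos hd]; exact Resolv_digit I C k t ht hd
  · rw [bVal, if_neg hd]
    have hres := hcov t ht
    rw [bRes] at hres
    rcases Bool.or_eq_true_iff.mp hres with h | h
    · exact absurd h hd
    · obtain ⟨v, hv⟩ := Option.isSome_iff_exists.mp h
      simp [hgrow t v hv]

theorem bRound_cov (I : PySem.Dict String String) (C : PySem.Dict String Int)
    (T : PySem.Dict String Int) (k : Nat) (hcov : Cov I C T k) :
    Cov I C (I.items.foldl bStep (T, false)).1 (k+1) := by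
  intro w hw
  rw [pvResolv] at hw
  rcases Bool.or_eq_true_iff.mp hw with hw | hw
  · exact bRes_keep I.items (T, false) w (hcov w hw)
  · obtain ⟨hd, hrest⟩ := Bool.and_eq_true_iff.mp hw
    rcases hI : I.get? w with _ | e <;> rw [hI] at hrest
    · exact absurd hrest (by simp)
    · have hmem : (w, e) ∈ I.items := PySem.Dict.mem_items_of_get?_eq_some I hI
      apply bFoldl_hits I.items (T, false) w e hmem
      intro T' hgrow
      exact Or.inr (bTry_ok T' (pvResolv I C k) e
        (fun t ht => Cov_bVal I C T T' k hcov hgrow t ht) hrest)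

theorem bRounds_main (I : PySem.Dict String String) (C : PySem.Dict String Int)
    (hnd : I.keys.Nodup) (wire : String) :
    ∀ n k T, TInv I C T → Cov I C T k → pvResolv I C (k + n) wire = true →
      TInv I C (bRounds I.items wire n T) ∧ bRes (bRounds I.items wire n T) wire = true := by
  intro n
  induction n with
  | zero =>
    intro k T hT hcov hres
    exact ⟨hT, hcov wire (by rwa [Nat.add_zero] at hres)⟩
  | succ n ih =>
    intro k T hT hcov hres
    rw [bRounds]
    by_cases hw : (T.get? wire).isSome = true
    · rw [if_pos hw]
      exact ⟨hT, by rw [bRes]; simp [hw]⟩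
    · rw [if_neg hw]
      rcases hstep : bRound I.items T with ⟨T', prog⟩
      cases prog
      · have hflag : (I.items.foldl bStep (T, false)).2 = false := by
          rw [show I.items.foldl bStep (T, false) = bRound I.items T from rfl, hstep]
        obtain ⟨hfix, hcond⟩ := bFoldl_no_progress I.items (T, false) hflag
        have hT' : T' = T := by
          have : bRound I.items T = (T, false) := by
            rw [show bRound I.items T = I.items.foldl bStep (T, false) from rfl, hfix]
          rw [hstep] at this
          exact congrArg Prod.fst this
        subst hT'
        have hfixCov : ∀ m, Cov I C T' (k + m) := by
          intro m
          induction m with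
          | zero => exact hcov
          | succ m ihm =>
            intro w hwr
            have hm : k + (m+1) = (k+m)+1 := by omega
            rw [hm, pvResolv] at hwr
            rcases Bool.or_eq_true_iff.mp hwr with hwr | hwr
            · exact ihm w hwr
            · obtain ⟨hd, hrest⟩ := Bool.and_eq_true_iff.mp hwr
              rcases hI : I.get? w with _ | e <;> rw [hI] at hrest
              · exact absurd hrest (by simp)
              · have hmem : (w, e) ∈ I.items := PySem.Dict.mem_items_of_get?_eq_some I hI
                rcases hcond (w, e) hmem with hok | hnone
                · exact hok
                · exfalso
                  have : (bTry T' e).isSome := bTry_ok T' (pvResolv I C (k+m)) e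
                    (fun t ht => Cov_bVal I C T' T' (k+m) ihm (fun _ _ h => h) t ht) hrest
                  rw [hnone] at this; cases this
        exact ⟨hT, hfixCov (n+1) wire hres⟩
      · have hT' : TInv I C T' := by
          have := bFoldl_inv I C hnd I.items (T, false) (fun q hq => hq) hT
          rw [show I.items.foldl bStep (T, false) = bRound I.items T from rfl, hstep] at this
          exact this
        have hcov' : Cov I C T' (k+1) := by
          have := bRound_cov I C T k hcov
          rw [show I.items.foldl bStep (T, false) = bRound I.items T from rfl, hstep] at this
          exact this
        exact ih (k+1) T' hT' hcov'
          (by have h' : k + 1 + n = k + (n+1) := by omega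
              rw [h']; exact hres)

-- ===== VERDICT (by name: the statement is the Claim_ definition above) =====
theorem get_value_spec : Claim_equal_get_value := by
  intro wire ins cache _ hpre
  unfold Pre_get_value at hpre
  unfold Spec_get_value get_value get_value_alt
  by_cases hd : PySem.Str.strIsdigit wire = true
  · rw [if_pos hd,
      show (PySem.Dict.ofList ins).size + 2 = ((PySem.Dict.ofList ins).size + 1) + 1 from rfl,
      gvA, if_pos hd]
    rcases hv : PySem.Int.ofStr? wire with _ | v <;> simp
  · rw [if_neg hd]
    obtain ⟨v, hev⟩ := Resolv_Ev (PySem.Dict.ofList ins) (PySem.Dict.ofList cache)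
      (PySem.Dict.ofList ins).size wire hpre
    obtain ⟨D', hA, _⟩ := gvA_sim (PySem.Dict.ofList ins) (PySem.Dict.ofList cache)
      ((PySem.Dict.ofList ins).size + 1) (g := (PySem.Dict.ofList ins).size + 2)
      (by omega) (GE_refl _ _) hev
    have hT0 : TInv (PySem.Dict.ofList ins) (PySem.Dict.ofList cache) (PySem.Dict.ofList cache) :=
      ⟨fun _ _ h => h, fun _ v' h => Or.inl h⟩
    have hcov0 : Cov (PySem.Dict.ofList ins) (PySem.Dict.ofList cache) (PySem.Dict.ofList cache) 0 := by
      intro w hw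
      rw [pvResolv] at hw
      by_cases hdw : PySem.Str.strIsdigit w = true
      · rw [bRes, hdw]; rfl
      · rw [if_neg hdw] at hw
        rw [bRes, Bool.or_eq_true_iff]; exact Or.inr hw
    obtain ⟨hTinv, hbres⟩ := bRounds_main (PySem.Dict.ofList ins) (PySem.Dict.ofList cache)
      (PySem.Dict.nodup_keys_ofList ins) wire (PySem.Dict.ofList ins).size 0
      (PySem.Dict.ofList cache) hT0 hcov0 (by rwa [Nat.zero_add])
    rw [bRes, Bool.or_eq_true_iff] at hbres
    rcases hbres with hbb | hbb
    · exact absurd hbb hd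
    · obtain ⟨v'', hv''⟩ := Option.isSome_iff_exists.mp hbb
      simp only [hA, hv'', Option.getD_some]
      rcases hTinv.2 wire v'' hv'' with hcc | ⟨f, hf⟩
      · rw [Ev, if_neg hd] at hev
        simp only [hcc] at hev
        exact (Option.some_inj.mp hev).symm
      · exact (Ev_det (PySem.Dict.ofList ins) (PySem.Dict.ofList cache) hf hev).symm
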